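-- pv_equiv track=rewrite | github.com/VaHiX/CodeForces | Python/ByRound/2161/2161_D_Locked_Out.py | solve
-- ===== SOURCE A (Python) =====
-- def solve(n: int, A: list[int]) -> int:
--     # rev[i] stores all indices where value i appears in the array
--     rev = [[] for _ in range(n + 1)]
--     for i in range(n):
--         rev[A[i]].append(i)
--
--     # dp[i] represents min cost to make subarray good ending at value i (including it)
--     # dpr[i] represents min cost to make subarray good ending at value i (excluding it)
--     dp = [n] * (n + 1)
--     dpr = [n] * (n + 1)
--     dp[0] = dpr[0] = 0
--
--     for i in range(n):
--         # Update dpr[i+1] with minimum of previous dp and dpr, plus number of elements at current value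
--         dpr[i + 1] = min(dp[i], dpr[i]) + len(rev[i + 1])
--         # dp[i+1] is initialized to dpr[i] (not including current value)
--         dp[i + 1] = dpr[i]
--
--         base = dp[i]
--         # Reverse the indices for current value to process from highest to lowest
--         rev[i].reverse()
--
--         z = len(rev[i + 1])
--         best = min(z, len(rev[i]))
--
--         ex = 0
--         # For each element at i+1, check how many elements at i are before it
--         for j in range(z):
--             # Remove indices from rev[i] that are less than current index in rev[i+1]
--             while rev[i] and rev[i][-1] < rev[i + 1][j]:
--                 ex += 1
--                 rev[i].pop()
--
--             # Update best considering conflicting elements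
--             best = min(best, z - j - 1 + ex)
--
--         # Update dp[i+1] with computed minimum
--         dp[i + 1] = min(dp[i + 1], base + best)
--
--     return min(dp[n], dpr[n])
-- ===== SOURCE B (Python) =====
-- def solve(n: int, A: list[int]) -> int:
--     # Same bucket DP, but the inner two-pointer pop loop is replaced by a
--     # per-element binary search (hand-written bisect_left) into the unmutated
--     # sorted index bucket, and the dp/dpr arrays by two rolling scalars.
--     rev = [[] for _ in range(n + 1)]
--     for i in range(n):
--         rev[A[i]].append(i)
--
--     def bisect_left(a, x):
--         lo, hi = 0, len(a)
--         while lo < hi: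
--             mid = (lo + hi) // 2
--             if a[mid] < x:
--                 lo = mid + 1
--             else:
--                 hi = mid
--         return lo
--
--     dp, dpr = 0, 0
--     for i in range(n):
--         cur = rev[i]
--         nxt = rev[i + 1]
--         z = len(nxt)
--         best = min(z, len(cur))
--         for j, x in enumerate(nxt):
--             best = min(best, z - j - 1 + bisect_left(cur, x))
--         dp, dpr = min(dpr, dp + best), min(dp, dpr) + z
--     return min(dp, dpr)
-- ===== Notes on version B (the rewrite author's own statement) =====
-- stated objective: alternative
-- what changed: A's destructive inner merge (reverse the bucket, pop indices in a while-loop, amortized two-pointer) is replaced by a per-element hand-written binary search (bisect_left) into the unmutated sorted bucket, and the dp/dpr arrays are replaced by two rolling scalars.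
import Mathlib
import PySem

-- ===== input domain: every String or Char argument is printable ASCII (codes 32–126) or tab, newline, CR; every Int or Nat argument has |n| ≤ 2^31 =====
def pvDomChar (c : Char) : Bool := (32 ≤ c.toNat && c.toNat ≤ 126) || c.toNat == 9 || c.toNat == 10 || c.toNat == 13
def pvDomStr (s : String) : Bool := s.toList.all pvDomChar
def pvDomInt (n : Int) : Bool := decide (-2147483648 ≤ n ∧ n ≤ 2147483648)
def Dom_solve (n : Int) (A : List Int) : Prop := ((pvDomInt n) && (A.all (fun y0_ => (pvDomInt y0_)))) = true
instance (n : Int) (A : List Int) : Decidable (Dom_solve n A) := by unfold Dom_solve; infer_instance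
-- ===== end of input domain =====

-- B replaces A's destructive reverse-and-pop inner merge by per-element binary search into the
-- unmutated sorted bucket, and A's dp/dpr arrays by two rolling scalars (objective: alternative).
-- A mutates no argument; the equivalence is about the return value.

-- ===== PORT A =====
-- the 'while rev[i] and rev[i][-1] < rev[i+1][j]: ex += 1; rev[i].pop()' loop
def popLoop (s : List Int) (x : Int) (ex : Int) : List Int × Int :=
  if h : s ≠ [] then
    if PySem.List.pyGetD s (-1) 0 < x then popLoop s.dropLast x (ex + 1) else (s, ex)
  else (s, ex)
termination_by s.length
decreasing_by
  have : s.length ≠ 0 := fun h0 => h (List.eq_nil_of_length_eq_zero h0)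
  simp [List.length_dropLast]; omega

def solve (n : Int) (A : List Int) : Int :=
  let rev0 : List (List Int) := (PySem.List.pyRange 0 (n + 1) 1).map (fun _ => ([] : List Int))
  let rev := (PySem.List.pyRange 0 n 1).foldl (fun rev i =>
      let v := PySem.List.pyGetD A i 0
      PySem.List.pySetD rev v (PySem.List.pyGetD rev v [] ++ [i])) rev0
  let dp0 := PySem.List.pySetD (List.replicate (n + 1).toNat n) 0 0
  let dpr0 := PySem.List.pySetD (List.replicate (n + 1).toNat n) 0 0
  let st := (PySem.List.pyRange 0 n 1).foldl
    (fun (st : List Int × List Int × List (List Int)) i =>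
      let dp := st.1; let dpr := st.2.1; let rev := st.2.2
      let dpr1 := PySem.List.pySetD dpr (i + 1)
        (min (PySem.List.pyGetD dp i 0) (PySem.List.pyGetD dpr i 0)
          + ((PySem.List.pyGetD rev (i + 1) []).length : Int))
      let dp1 := PySem.List.pySetD dp (i + 1) (PySem.List.pyGetD dpr1 i 0)
      let base := PySem.List.pyGetD dp1 i 0
      let rev1 := PySem.List.pySetD rev i (PySem.List.pyGetD rev i []).reverse
      let z : Int := ((PySem.List.pyGetD rev1 (i + 1) []).length : Int)
      let best0 := min z ((PySem.List.pyGetD rev1 i []).length : Int)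
      let inner := (PySem.List.pyRange 0 z 1).foldl
        (fun (s : List Int × Int × Int) j =>
          let res := popLoop s.1 (PySem.List.pyGetD (PySem.List.pyGetD rev1 (i + 1) []) j 0) s.2.1
          (res.1, res.2, min s.2.2 (z - j - 1 + res.2)))
        (PySem.List.pyGetD rev1 i [], 0, best0)
      let rev2 := PySem.List.pySetD rev1 i inner.1
      let dp2 := PySem.List.pySetD dp1 (i + 1)
        (min (PySem.List.pyGetD dp1 (i + 1) 0) (base + inner.2.2))
      (dp2, dpr1, rev2))
    (dp0, dpr0, rev)
  min (PySem.List.pyGetD st.1 n 0) (PySem.List.pyGetD st.2.1 n 0)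

-- ===== PORT B =====
-- hand-written bisect_left from Source B: 'while lo < hi: mid = (lo+hi)//2; ...'; the fuel only
-- makes the while-loop total (strictly shrinking bracket, so a.length + 1 steps always suffice)
def bisectLoop (fuel : Nat) (lo hi : Int) (a : List Int) (x : Int) : Int :=
  match fuel with
  | 0 => lo
  | fuel + 1 =>
    if lo < hi then
      let mid := PySem.Int.floordiv (lo + hi) 2
      if PySem.List.pyGetD a mid 0 < x then bisectLoop fuel (mid + 1) hi a x
      else bisectLoop fuel lo mid a x
    else lo

def bisectLeft (a : List Int) (x : Int) : Int :=
  bisectLoop (a.length + 1) 0 (a.length : Int) a x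

def solve_alt (n : Int) (A : List Int) : Int :=
  let rev0 : List (List Int) := (PySem.List.pyRange 0 (n + 1) 1).map (fun _ => ([] : List Int))
  let rev := (PySem.List.pyRange 0 n 1).foldl (fun rev i =>
      PySem.List.pySetD rev (PySem.List.pyGetD A i 0)
        (PySem.List.pyGetD rev (PySem.List.pyGetD A i 0) [] ++ [i])) rev0
  let st := (PySem.List.pyRange 0 n 1).foldl (fun (s : Int × Int) i =>
      let cur := PySem.List.pyGetD rev i []
      let nxt := PySem.List.pyGetD rev (i + 1) []
      let z : Int := (nxt.length : Int)
      let best := (PySem.List.enumerate nxt 0).foldl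
          (fun b p => min b (z - p.1 - 1 + bisectLeft cur p.2)) (min z (cur.length : Int))
      (min s.2 (s.1 + best), min s.1 s.2 + z)) (0, 0)
  min st.1 st.2

-- ===== PRECONDITION & SPEC =====
-- Pre_ is exactly the inputs on which the Python A returns normally: n ≥ 0, A long enough for the
-- n indexing reads, and each of the n read values a valid (possibly negative, Python-wrapping)
-- index into the n+1 buckets; anywhere else A raises IndexError.
def Pre_solve (n : Int) (A : List Int) : Prop :=
  0 ≤ n ∧ n ≤ (A.length : Int) ∧ ∀ a ∈ A.take n.toNat, -(n + 1) ≤ a ∧ a ≤ n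

instance (n : Int) (A : List Int) : Decidable (Pre_solve n A) := by
  unfold Pre_solve; infer_instance

def pvWitness_solve : Int × List Int := (5, [2, 2, 1, 3, 3])

def Spec_solve (n : Int) (A : List Int) (out : Int) : Prop := out = solve_alt n A
instance (n : Int) (A : List Int) (out : Int) : Decidable (Spec_solve n A out) := by
  unfold Spec_solve; infer_instance

-- ===== CLAIM (what is proved, stated in full; the proofs are below) =====
def Claim_equal_solve : Prop :=
  ∀ (n : Int) (A : List Int), Dom_solve n A → Pre_solve n A → Spec_solve n A (solve n A)

-- ===== LEMMAS AND PROOFS =====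

-- ---- generic list helpers ----
theorem getD_set_self {α : Type} (l : List α) (i : Nat) (h : i < l.length) (a d : α) :
    (l.set i a).getD i d = a := by
  simp [List.getD_eq_getElem?_getD, List.getElem?_set_self h]

theorem getD_set_ne {α : Type} (l : List α) {i j : Nat} (h : i ≠ j) (a d : α) :
    (l.set i a).getD j d = l.getD j d := by
  simp [List.getD_eq_getElem?_getD, List.getElem?_set_ne h]

theorem getD_map_const_nil {α β : Type} (l : List α) (k : Nat) :
    ((l.map (fun _ => ([] : List β))).getD k []) = [] := by
  induction l generalizing k with
  | nil => simp
  | cons a t ih => cases k with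
    | zero => rfl
    | succ k => simp only [List.map_cons, List.getD_cons_succ]; exact ih k

theorem dropWhile_dropWhile {α : Type} (l : List α) (p q : α → Bool)
    (h : ∀ x, q x = true → p x = true) :
    (l.dropWhile q).dropWhile p = l.dropWhile p := by
  induction l with
  | nil => rfl
  | cons a t ih =>
      by_cases hq : q a
      · simp [hq, h a hq, ih]
      · simp [List.dropWhile_cons, hq]

theorem takeWhile_length_add {α : Type} (l : List α) (p q : α → Bool)
    (h : ∀ x, q x = true → p x = true) :
    (l.takeWhile q).length + ((l.dropWhile q).takeWhile p).length = (l.takeWhile p).length := by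
  induction l with
  | nil => rfl
  | cons a t ih =>
      by_cases hq : q a
      · simp [hq, h a hq]
        omega
      · simp [List.takeWhile_cons, hq]

theorem sorted_lt_iff (x : Int) : ∀ (L : List Int), L.Pairwise (· ≤ ·) →
    ∀ (i : Nat) (h : i < L.length),
    (L[i] < x ↔ i < (L.takeWhile (fun t => decide (t < x))).length) := by
  intro L hL
  induction L with
  | nil => intro i h; simp at h
  | cons a t ih =>
      rw [List.pairwise_cons] at hL
      intro i h
      cases i with
      | zero =>
          by_cases hax : a < x
          · simp [hax]
          · simp [hax]
      | succ i =>
          by_cases hax : a < x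
          · simpa [hax] using ih hL.2 i (by simpa using h)
          · have hi : i < t.length := by simpa using h
            have : ¬ t[i] < x := by
              have := hL.1 t[i] (List.getElem_mem hi)
              omega
            simp [hax, this]

-- ---- Python index normalization ----
def effIdx (L : Nat) (v : Int) : Nat := if v < 0 then L - (-v).toNat else v.toNat

theorem effIdx_lt (L : Nat) (v : Int) (h1 : -(L : Int) ≤ v) (h2 : v < L) :
    effIdx L v < L := by
  unfold effIdx; split_ifs <;> omega

theorem pyGetD_eff {α : Type} (xs : List α) (v : Int) (d : α)
    (h1 : -(xs.length : Int) ≤ v) (h2 : v < xs.length) :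
    PySem.List.pyGetD xs v d = xs.getD (effIdx xs.length v) d := by
  simp only [PySem.List.pyGetD, PySem.List.pyGet?, PySem.List.pyIdx?, effIdx]
  rcases lt_or_ge v 0 with hv | hv
  · simp [hv, not_le.mpr hv, h1, List.getD_eq_getElem?_getD]
  · simp [not_lt.mpr hv, hv, h2, List.getD_eq_getElem?_getD]

theorem pySetD_eff {α : Type} (xs : List α) (v : Int) (y : α)
    (h1 : -(xs.length : Int) ≤ v) (h2 : v < xs.length) :
    PySem.List.pySetD xs v y = xs.set (effIdx xs.length v) y := by
  simp only [PySem.List.pySetD, PySem.List.pySet?, PySem.List.pyIdx?, effIdx]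
  rcases lt_or_ge v 0 with hv | hv
  · simp [hv, not_le.mpr hv, h1]
  · simp [not_lt.mpr hv, hv, h2]

-- ---- pyRange folds are List.range folds ----
theorem pyfold_to_range {σ : Type} (f : σ → Int → σ) (init : σ) (n : Int) :
    (PySem.List.pyRange 0 n 1).foldl f init
      = (List.range n.toNat).foldl (fun s (k : Nat) => f s (k : Int)) init := by
  rw [PySem.List.pyRange_one, List.foldl_map]
  simp only [zero_add, sub_zero]

-- ---- the common bucket build ----
def stepBuild (A : List Int) (rev : List (List Int)) (m : Nat) : List (List Int) :=
  PySem.List.pySetD rev (A.getD m 0)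
    (PySem.List.pyGetD rev (A.getD m 0) [] ++ [(m : Int)])

def buildC (n : Int) (A : List Int) : Nat → List (List Int)
  | 0 => (PySem.List.pyRange 0 (n + 1) 1).map (fun _ => ([] : List Int))
  | m + 1 => stepBuild A (buildC n A m) m

theorem buildC_eq_foldRange (n : Int) (A : List Int) (m : Nat) :
    buildC n A m = (List.range m).foldl (stepBuild A) (buildC n A 0) := by
  induction m with
  | zero => rfl
  | succ m ih => rw [List.range_succ, List.foldl_append, ← ih]; rfl

theorem buildA_eq (n : Int) (A : List Int) :
    (PySem.List.pyRange 0 n 1).foldl (fun rev i =>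
        let v := PySem.List.pyGetD A i 0
        PySem.List.pySetD rev v (PySem.List.pyGetD rev v [] ++ [i]))
      ((PySem.List.pyRange 0 (n + 1) 1).map (fun _ => ([] : List Int)))
    = buildC n A n.toNat := by
  rw [pyfold_to_range, buildC_eq_foldRange]
  apply PySem.List.foldl_congr_mem
  intro rev k _
  simp [stepBuild]

theorem buildB_eq (n : Int) (A : List Int) :
    (PySem.List.pyRange 0 n 1).foldl (fun rev i =>
        PySem.List.pySetD rev (PySem.List.pyGetD A i 0)
          (PySem.List.pyGetD rev (PySem.List.pyGetD A i 0) [] ++ [i]))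
      ((PySem.List.pyRange 0 (n + 1) 1).map (fun _ => ([] : List Int)))
    = buildC n A n.toNat := by
  rw [pyfold_to_range, buildC_eq_foldRange]
  apply PySem.List.foldl_congr_mem
  intro rev k _
  simp [stepBuild]

-- bucket invariant of the build
theorem buildC_inv (n : Int) (A : List Int) (hn : 0 ≤ n) (hlen : n ≤ (A.length : Int))
    (hval : ∀ a ∈ A.take n.toNat, -(n + 1) ≤ a ∧ a ≤ n) :
    ∀ m, m ≤ n.toNat →
      (buildC n A m).length = (n + 1).toNat ∧
      ∀ k : Nat, ((buildC n A m).getD k []).Pairwise (· < ·) ∧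
        ∀ t ∈ (buildC n A m).getD k [], 0 ≤ t ∧ t < (m : Int) := by
  intro m
  induction m with
  | zero =>
      intro _
      constructor
      · simp [buildC, PySem.List.length_pyRange_one]
      · intro k
        rw [show buildC n A 0 = (PySem.List.pyRange 0 (n + 1) 1).map (fun _ => ([] : List Int)) from rfl]
        rw [getD_map_const_nil]
        simp
  | succ m ih =>
      intro hm1
      obtain ⟨hlenm, hbk⟩ := ih (by omega)
      have hmA : m < A.length := by omega
      have hvA : A.getD m 0 = A[m] := by
        simp [List.getD_eq_getElem?_getD, List.getElem?_eq_getElem hmA]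
      have hvmem : A[m] ∈ A.take n.toNat := by
        have : (A.take n.toNat)[m]'(by simp; omega) = A[m] := List.getElem_take
        rw [← this]; exact List.getElem_mem _
      obtain ⟨hv1, hv2⟩ := hval _ hvmem
      have hS : ((n + 1).toNat : Int) = n + 1 := Int.toNat_of_nonneg (by omega)
      have hb1 : -((buildC n A m).length : Int) ≤ A.getD m 0 := by rw [hlenm, hS, hvA]; omega
      have hb2 : A.getD m 0 < ((buildC n A m).length : Int) := by rw [hlenm, hS, hvA]; omega
      have heff : effIdx (buildC n A m).length (A.getD m 0) < (buildC n A m).length :=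
        effIdx_lt _ _ hb1 hb2
      have hstep : buildC n A (m + 1)
          = (buildC n A m).set (effIdx (buildC n A m).length (A.getD m 0))
              ((buildC n A m).getD (effIdx (buildC n A m).length (A.getD m 0)) [] ++ [(m : Int)]) := by
        show stepBuild A (buildC n A m) m = _
        rw [stepBuild, pySetD_eff _ _ _ hb1 hb2, pyGetD_eff _ _ _ hb1 hb2]
      rw [hstep]
      constructor
      · rw [List.length_set]; exact hlenm
      · intro k
        by_cases hk : k = effIdx (buildC n A m).length (A.getD m 0)
        · subst hk
          rw [getD_set_self _ _ heff]
          constructor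
          · rw [List.pairwise_append]
            refine ⟨(hbk _).1, by simp, ?_⟩
            intro t htmem u humem
            have := (hbk _).2 t htmem
            simp at humem
            omega
          · intro t htmem
            rcases List.mem_append.mp htmem with h | h
            · have := (hbk _).2 t h; push_cast; omega
            · simp at h; push_cast; omega
        · rw [getD_set_ne _ (Ne.symm hk)]
          refine ⟨(hbk k).1, ?_⟩
          intro t htmem
          have := (hbk k).2 t htmem
          push_cast
          omega

-- ---- the inner loop: pop-merge = per-element bisect ----
theorem popLoop_reverse (x : Int) : ∀ (M : List Int) (c : Int),
    popLoop M.reverse x c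
      = ((M.dropWhile (fun t => decide (t < x))).reverse,
         c + ((M.takeWhile (fun t => decide (t < x))).length : Int)) := by
  intro M
  induction M with
  | nil => intro c; rw [popLoop]; simp
  | cons a t ih =>
      intro c
      rw [popLoop]
      have hne : (a :: t).reverse ≠ [] := by simp
      rw [List.reverse_cons]
      by_cases hax : a < x
      · simp only [PySem.List.pyGetD_neg_one_append_singleton, hax, if_true,
          dif_pos (by simp : t.reverse ++ [a] ≠ ([] : List Int)), List.dropLast_concat]
        rw [ih (c + 1)]
        simp [hax]
        ring
      · simp [PySem.List.pyGetD_neg_one_append_singleton, hax]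

theorem bisectLoop_eq (L : List Int) (x : Int) (hL : L.Pairwise (· ≤ ·)) :
    ∀ (fuel : Nat) (lo hi : Int), 0 ≤ lo →
      hi ≤ (L.length : Int) →
      lo ≤ ((L.takeWhile (fun t => decide (t < x))).length : Int) →
      ((L.takeWhile (fun t => decide (t < x))).length : Int) ≤ hi →
      (hi - lo).toNat < fuel →
      bisectLoop fuel lo hi L x = ((L.takeWhile (fun t => decide (t < x))).length : Int) := by
  intro fuel
  induction fuel with
  | zero => intro lo hi _ _ _ _ hf; omega
  | succ fuel ih =>
      intro lo hi h0 hhi hloK hKhi hf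
      simp only [bisectLoop]
      by_cases hlh : lo < hi
      · simp only [hlh, if_true]
        obtain ⟨hm1, hm2⟩ := PySem.Int.floordiv_two_mid_bounds (le_of_lt hlh)
        set mid := PySem.Int.floordiv (lo + hi) 2 with hmid
        have hmlt : mid < hi := by
          rw [hmid, PySem.Int.floordiv_lt_iff_lt_mul (by norm_num)]; omega
        have hmid0 : 0 ≤ mid := le_trans h0 hm1
        have hmidLen : mid < (L.length : Int) := lt_of_lt_of_le hmlt hhi
        have hmidNat : mid.toNat < L.length := by omega
        have hcast : (mid.toNat : Int) = mid := Int.toNat_of_nonneg hmid0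
        rw [PySem.List.pyGetD_eq_getElem L 0 hmid0 hmidLen]
        have hiff := sorted_lt_iff x L hL mid.toNat hmidNat
        by_cases hcond : L[mid.toNat] < x
        · have hmK : mid < ((L.takeWhile (fun t => decide (t < x))).length : Int) := by
            have := hiff.mp hcond; omega
          simp only [hcond, if_true]
          exact ih (mid + 1) hi (by omega) hhi (by omega) hKhi (by omega)
        · have hKm : ((L.takeWhile (fun t => decide (t < x))).length : Int) ≤ mid := by
            by_contra hc
            exact hcond (hiff.mpr (by omega))
          simp only [hcond, if_false]
          exact ih lo mid h0 (le_of_lt hmidLen) hloK hKm (by omega)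
      · simp only [hlh, if_false]
        omega

theorem bisectLeft_eq (L : List Int) (x : Int) (hL : L.Pairwise (· ≤ ·)) :
    bisectLeft L x = ((L.takeWhile (fun t => decide (t < x))).length : Int) := by
  have hle : (L.takeWhile (fun t => decide (t < x))).length ≤ L.length :=
    (List.takeWhile_sublist _).length_le
  exact bisectLoop_eq L x hL (L.length + 1) 0 (L.length : Int) le_rfl le_rfl
    (by positivity) (by exact_mod_cast hle) (by omega)

theorem innerCore (L : List Int) (z : Int) (hLs : L.Pairwise (· ≤ ·)) :
    ∀ (ps : List (Int × Int)) (M : List Int) (c best : Int),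
      (∀ r ∈ ps.map (·.2),
        M.dropWhile (fun t => decide (t < r)) = L.dropWhile (fun t => decide (t < r)) ∧
        c + ((M.takeWhile (fun t => decide (t < r))).length : Int)
          = ((L.takeWhile (fun t => decide (t < r))).length : Int)) →
      (ps.map (·.2)).Pairwise (· ≤ ·) →
      (ps.foldl (fun (s : List Int × Int × Int) p =>
          let res := popLoop s.1 p.2 s.2.1
          (res.1, res.2, min s.2.2 (z - p.1 - 1 + res.2))) (M.reverse, c, best)).2.2
      = ps.foldl (fun b p => min b (z - p.1 - 1 + bisectLeft L p.2)) best := by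
  intro ps
  induction ps with
  | nil => intro M c best _ _; rfl
  | cons p ps ih =>
      intro M c best hM hs
      simp only [List.map_cons, List.pairwise_cons] at hs
      obtain ⟨hd, ht⟩ := hM p.2 (by simp)
      simp only [List.foldl_cons, popLoop_reverse]
      rw [bisectLeft_eq L p.2 hLs]
      rw [hd, ht]
      exact ih (L.dropWhile (fun t => decide (t < p.2)))
        ((L.takeWhile (fun t => decide (t < p.2))).length : Int) _
        (by
          intro r hr
          have hpr : p.2 ≤ r := hs.1 r hr
          have himp : ∀ t : Int, decide (t < p.2) = true → decide (t < r) = true := by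
            intro t h; simp at h ⊢; omega
          constructor
          · exact dropWhile_dropWhile L _ _ himp
          · have := takeWhile_length_add L _ _ himp
            push_cast [← this]
            ring)
        hs.2

-- ---- named step functions equal to the ports' loop bodies ----
def bodyA (st : List Int × List Int × List (List Int)) (i : Int) :
    List Int × List Int × List (List Int) :=
  let dp := st.1; let dpr := st.2.1; let rev := st.2.2
  let dpr1 := PySem.List.pySetD dpr (i + 1)
    (min (PySem.List.pyGetD dp i 0) (PySem.List.pyGetD dpr i 0)
      + ((PySem.List.pyGetD rev (i + 1) []).length : Int))
  let dp1 := PySem.List.pySetD dp (i + 1) (PySem.List.pyGetD dpr1 i 0)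
  let base := PySem.List.pyGetD dp1 i 0
  let rev1 := PySem.List.pySetD rev i (PySem.List.pyGetD rev i []).reverse
  let z : Int := ((PySem.List.pyGetD rev1 (i + 1) []).length : Int)
  let best0 := min z ((PySem.List.pyGetD rev1 i []).length : Int)
  let inner := (PySem.List.pyRange 0 z 1).foldl
    (fun (s : List Int × Int × Int) j =>
      let res := popLoop s.1 (PySem.List.pyGetD (PySem.List.pyGetD rev1 (i + 1) []) j 0) s.2.1
      (res.1, res.2, min s.2.2 (z - j - 1 + res.2)))
    (PySem.List.pyGetD rev1 i [], 0, best0)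
  let rev2 := PySem.List.pySetD rev1 i inner.1
  let dp2 := PySem.List.pySetD dp1 (i + 1)
    (min (PySem.List.pyGetD dp1 (i + 1) 0) (base + inner.2.2))
  (dp2, dpr1, rev2)

def bodyB (rev : List (List Int)) (s : Int × Int) (i : Int) : Int × Int :=
  let cur := PySem.List.pyGetD rev i []
  let nxt := PySem.List.pyGetD rev (i + 1) []
  let z : Int := (nxt.length : Int)
  let best := (PySem.List.enumerate nxt 0).foldl
      (fun b p => min b (z - p.1 - 1 + bisectLeft cur p.2)) (min z (cur.length : Int))
  (min s.2 (s.1 + best), min s.1 s.2 + z)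

def revBuildA (n : Int) (A : List Int) : List (List Int) :=
  (PySem.List.pyRange 0 n 1).foldl (fun rev i =>
      let v := PySem.List.pyGetD A i 0
      PySem.List.pySetD rev v (PySem.List.pyGetD rev v [] ++ [i]))
    ((PySem.List.pyRange 0 (n + 1) 1).map (fun _ => ([] : List Int)))

def revBuildB (n : Int) (A : List Int) : List (List Int) :=
  (PySem.List.pyRange 0 n 1).foldl (fun rev i =>
      PySem.List.pySetD rev (PySem.List.pyGetD A i 0)
        (PySem.List.pyGetD rev (PySem.List.pyGetD A i 0) [] ++ [i]))
    ((PySem.List.pyRange 0 (n + 1) 1).map (fun _ => ([] : List Int)))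

def initA (n : Int) (R : List (List Int)) : List Int × List Int × List (List Int) :=
  (PySem.List.pySetD (List.replicate (n + 1).toNat n) 0 0,
   PySem.List.pySetD (List.replicate (n + 1).toNat n) 0 0, R)

theorem solve_unfold (n : Int) (A : List Int) :
    solve n A =
      min (PySem.List.pyGetD
            (((PySem.List.pyRange 0 n 1).foldl bodyA (initA n (revBuildA n A))).1) n 0)
          (PySem.List.pyGetD
            (((PySem.List.pyRange 0 n 1).foldl bodyA (initA n (revBuildA n A))).2.1) n 0) := rfl

theorem solve_alt_unfold (n : Int) (A : List Int) :
    solve_alt n A =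
      min (((PySem.List.pyRange 0 n 1).foldl (bodyB (revBuildB n A)) (0, 0)).1)
          (((PySem.List.pyRange 0 n 1).foldl (bodyB (revBuildB n A)) (0, 0)).2) := rfl

-- ---- one simulated step of the main loop ----
theorem stepA_sim (n : Int) (R : List (List Int)) (k : Nat)
    (hn : 0 ≤ n) (hk : k < n.toNat)
    (hRsort : ∀ j : Nat, (R.getD j []).Pairwise (· < ·))
    (dp dpr rev : _) (a b : Int)
    (hl1 : dp.length = (n + 1).toNat) (hl2 : dpr.length = (n + 1).toNat)
    (hl3 : rev.length = (n + 1).toNat)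
    (ha : dp.getD k 0 = a) (hb : dpr.getD k 0 = b)
    (hrev : ∀ j : Nat, k ≤ j → rev.getD j [] = R.getD j []) :
    (bodyA (dp, dpr, rev) (k : Int)).1.length = (n + 1).toNat ∧
    (bodyA (dp, dpr, rev) (k : Int)).2.1.length = (n + 1).toNat ∧
    (bodyA (dp, dpr, rev) (k : Int)).2.2.length = (n + 1).toNat ∧
    (bodyA (dp, dpr, rev) (k : Int)).1.getD (k + 1) 0 = (bodyB R (a, b) (k : Int)).1 ∧
    (bodyA (dp, dpr, rev) (k : Int)).2.1.getD (k + 1) 0 = (bodyB R (a, b) (k : Int)).2 ∧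
    ∀ j : Nat, k + 1 ≤ j → (bodyA (dp, dpr, rev) (k : Int)).2.2.getD j [] = R.getD j [] := by
  have hS : (n + 1).toNat = n.toNat + 1 := by omega
  have hcast : ((k : Int) + 1) = ((k + 1 : Nat) : Int) := by push_cast; ring
  have hne : (k + 1 : Nat) ≠ k := by omega
  have hne' : (k : Nat) ≠ k + 1 := by omega
  have hrevk : rev.getD k [] = R.getD k [] := hrev k le_rfl
  have hrevk1 : rev.getD (k + 1) [] = R.getD (k + 1) [] := hrev (k + 1) (by omega)
  simp only [bodyA, bodyB, hcast, PySem.List.pySetD_natCast, PySem.List.pyGetD_natCast]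
  simp only [getD_set_ne _ hne, getD_set_ne _ hne',
    getD_set_self rev k (by omega : k < rev.length),
    getD_set_self dp (k + 1) (by omega : k + 1 < dp.length),
    getD_set_self dpr (k + 1) (by omega : k + 1 < dpr.length),
    hrevk, hrevk1, ha, hb]
  simp only [getD_set_self (dp.set (k + 1) b) (k + 1)
    (by rw [List.length_set]; omega : k + 1 < (dp.set (k + 1) b).length)]
  set cur := R.getD k [] with hcur
  set nxt := R.getD (k + 1) [] with hnxt
  have hinner :
      ((PySem.List.pyRange 0 ((nxt.length : Int)) 1).foldl
        (fun (s : List Int × Int × Int) j =>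
          let res := popLoop s.1 (PySem.List.pyGetD nxt j 0) s.2.1
          (res.1, res.2, min s.2.2 ((nxt.length : Int) - j - 1 + res.2)))
        (cur.reverse, 0, min (nxt.length : Int) ((cur.reverse.length : Int)))).2.2
      = (PySem.List.enumerate nxt 0).foldl
          (fun b p => min b ((nxt.length : Int) - p.1 - 1 + bisectLeft cur p.2))
          (min (nxt.length : Int) ((cur.length : Int))) := by
    have hconv :
        (PySem.List.enumerate nxt 0).foldl
          (fun (s : List Int × Int × Int) p =>
            let res := popLoop s.1 p.2 s.2.1
            (res.1, res.2, min s.2.2 ((nxt.length : Int) - p.1 - 1 + res.2)))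
          (cur.reverse, 0, min (nxt.length : Int) ((cur.length : Int)))
        = (PySem.List.pyRange 0 ((nxt.length : Int)) 1).foldl
            (fun (s : List Int × Int × Int) j =>
              let res := popLoop s.1 (PySem.List.pyGetD nxt j 0) s.2.1
              (res.1, res.2, min s.2.2 ((nxt.length : Int) - j - 1 + res.2)))
            (cur.reverse, 0, min (nxt.length : Int) ((cur.length : Int))) := by
      rw [PySem.List.enumerate_eq_map_pyRange nxt 0, List.foldl_map]
      simp [PySem.List.len_eq]
    rw [List.length_reverse, ← hconv]
    exact innerCore cur (nxt.length : Int)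
      ((hRsort k).imp (fun h => le_of_lt h))
      (PySem.List.enumerate nxt 0) cur 0 (min (nxt.length : Int) ((cur.length : Int)))
      (by intro r _; simp)
      (by rw [PySem.List.map_snd_enumerate]
          exact (hRsort (k + 1)).imp (fun h => le_of_lt h))
  refine ⟨?_, ?_, ?_, ?_, ?_, ?_⟩
  · simp [List.length_set, hl1]
  · simp [List.length_set, hl2]
  · simp [List.length_set, hl3]
  · rw [hinner]
  · trivial
  · intro j hj
    rw [getD_set_ne _ (by omega : k ≠ j), getD_set_ne _ (by omega : k ≠ j)]
    exact hrev j (by omega)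

-- ---- main loop invariant ----
def FA (n : Int) (R : List (List Int)) (k : Nat) : List Int × List Int × List (List Int) :=
  (List.range k).foldl (fun st (m : Nat) => bodyA st (m : Int)) (initA n R)

def FB (R : List (List Int)) (k : Nat) : Int × Int :=
  (List.range k).foldl (fun s (m : Nat) => bodyB R s (m : Int)) (0, 0)

theorem main_inv (n : Int) (R : List (List Int))
    (hn : 0 ≤ n)
    (hRlen : R.length = (n + 1).toNat)
    (hRsort : ∀ j : Nat, (R.getD j []).Pairwise (· < ·)) :
    ∀ k, k ≤ n.toNat →
      (FA n R k).1.length = (n + 1).toNat ∧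
      (FA n R k).2.1.length = (n + 1).toNat ∧
      (FA n R k).2.2.length = (n + 1).toNat ∧
      (FA n R k).1.getD k 0 = (FB R k).1 ∧
      (FA n R k).2.1.getD k 0 = (FB R k).2 ∧
      ∀ j : Nat, k ≤ j → (FA n R k).2.2.getD j [] = R.getD j [] := by
  intro k
  induction k with
  | zero =>
      intro _
      have hdp : (PySem.List.pySetD (List.replicate (n + 1).toNat n) 0 0).getD 0 0 = 0 := by
        rw [PySem.List.pySetD_of_nonneg _ _ (by norm_num)]
        simp only [Int.toNat_zero]
        rw [getD_set_self _ _ (by simp; omega)]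
      refine ⟨?_, ?_, ?_, ?_, ?_, ?_⟩
      · simp [FA, initA, PySem.List.length_pySetD]
      · simp [FA, initA, PySem.List.length_pySetD]
      · simpa [FA, initA] using hRlen
      · simpa [FA, initA, FB] using hdp
      · simpa [FA, initA, FB] using hdp
      · intro j _; rfl
  | succ k ih =>
      intro hk1
      obtain ⟨h1, h2, h3, h4, h5, h6⟩ := ih (by omega)
      have hFA : FA n R (k + 1) = bodyA (FA n R k) (k : Int) := by
        simp [FA, List.range_succ]
      have hFB : FB R (k + 1) = bodyB R (FB R k) (k : Int) := by
        simp [FB, List.range_succ]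
      have heta : ((FA n R k).1, (FA n R k).2.1, (FA n R k).2.2) = FA n R k := by simp
      have hetaB : ((FB R k).1, (FB R k).2) = FB R k := by simp
      obtain ⟨g1, g2, g3, g4, g5, g6⟩ :=
        stepA_sim n R k hn (by omega) hRsort
          (FA n R k).1 (FA n R k).2.1 (FA n R k).2.2 (FB R k).1 (FB R k).2
          h1 h2 h3 h4 h5 h6
      rw [heta] at g1 g2 g3 g4 g5 g6
      rw [hetaB] at g4 g5
      rw [hFA, hFB]
      exact ⟨g1, g2, g3, g4, g5, g6⟩

-- ===== VERDICT (by name: the statement is the Claim_ definition above) =====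
theorem solve_spec : Claim_equal_solve := by
  intro n A _ hpre
  obtain ⟨hn, hlen, hval⟩ := hpre
  show solve n A = solve_alt n A
  rw [solve_unfold, solve_alt_unfold]
  have hbuild := buildC_inv n A hn hlen hval n.toNat le_rfl
  have hA : revBuildA n A = buildC n A n.toNat := buildA_eq n A
  have hB : revBuildB n A = buildC n A n.toNat := buildB_eq n A
  rw [hA, hB]
  rw [pyfold_to_range bodyA (initA n (buildC n A n.toNat)) n]
  rw [pyfold_to_range (bodyB (buildC n A n.toNat)) (0, 0) n]
  change min (PySem.List.pyGetD (FA n (buildC n A n.toNat) n.toNat).1 n 0)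
      (PySem.List.pyGetD (FA n (buildC n A n.toNat) n.toNat).2.1 n 0)
    = min (FB (buildC n A n.toNat) n.toNat).1 (FB (buildC n A n.toNat) n.toNat).2
  obtain ⟨_, _, _, h4, h5, _⟩ :=
    main_inv n (buildC n A n.toNat) hn hbuild.1 (fun j => (hbuild.2 j).1) n.toNat le_rfl
  have hget : ∀ xs : List Int, PySem.List.pyGetD xs n 0 = xs.getD n.toNat 0 := by
    intro xs
    conv_lhs => rw [← Int.toNat_of_nonneg hn]
    rw [PySem.List.pyGetD_natCast]
  rw [hget, hget, h4, h5]
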